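-- pv_equiv track=rewrite | github.com/Tale152/LTL_model_checker | base_operators.py | U_operator_non_determinism
-- ===== SOURCE A (Python) =====
-- def create_array_with_value(size, value):
--     result = []
--     for i in range(size):
--         result.append(value)
--     return result
--
-- def U_operator_non_determinism(first, second, i, loop_size, current_results):
--     n_states = len(first)
--     for j in range(i + 1, n_states + 1):
--         if j == n_states:
--             actual_j = n_states - loop_size
--             if len(current_results) <= actual_j:
--                 return create_array_with_value(n_states - i, False)
--             else:
--                 if current_results[actual_j] == True:
--                     return create_array_with_value(j - i, True)
--                 else:
--                     return create_array_with_value(j - i, False)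
--         else:
--             if second[j] == True:
--                 return create_array_with_value(j - i + 1, True)
--             elif first[i] == False:
--                 return create_array_with_value(j - i + 1, False)
-- ===== SOURCE B (Python) =====
-- def _first_true(second, j, n):
--     if j >= n:
--         return None
--     if second[j] == True:
--         return j
--     return _first_true(second, j + 1, n)
--
-- def U_operator_non_determinism(first, second, i, loop_size, current_results):
--     n = len(first)
--     if i >= n:
--         return None
--     if i + 1 < n and second[i + 1] == True:
--         return [True, True]
--     if i + 1 < n and first[i] == False:
--         return [False, False]
--     k = _first_true(second, i + 2, n)
--     if k is not None:
--         return [True] * (k - i + 1)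
--     actual_j = n - loop_size
--     if len(current_results) <= actual_j:
--         return [False] * (n - i)
--     return [current_results[actual_j] == True] * (n - i)
-- ===== Notes on version B (the rewrite author's own statement) =====
-- stated objective: alternative
-- what changed: B replaces A's single fused loop (terminal step folded into every iteration) by a recursive decomposition: two hoisted constant-size guards for the j=i+1 step (second[i+1], then the loop-invariant first[i]), a recursive first-match helper over second[i+2:n], and the terminal step as straight-line fall-through code.
-- outside the precondition, e.g. on U_operator_non_determinism([True], [True], 5, 1, []): A returns None, B returns None
import Mathlib
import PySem

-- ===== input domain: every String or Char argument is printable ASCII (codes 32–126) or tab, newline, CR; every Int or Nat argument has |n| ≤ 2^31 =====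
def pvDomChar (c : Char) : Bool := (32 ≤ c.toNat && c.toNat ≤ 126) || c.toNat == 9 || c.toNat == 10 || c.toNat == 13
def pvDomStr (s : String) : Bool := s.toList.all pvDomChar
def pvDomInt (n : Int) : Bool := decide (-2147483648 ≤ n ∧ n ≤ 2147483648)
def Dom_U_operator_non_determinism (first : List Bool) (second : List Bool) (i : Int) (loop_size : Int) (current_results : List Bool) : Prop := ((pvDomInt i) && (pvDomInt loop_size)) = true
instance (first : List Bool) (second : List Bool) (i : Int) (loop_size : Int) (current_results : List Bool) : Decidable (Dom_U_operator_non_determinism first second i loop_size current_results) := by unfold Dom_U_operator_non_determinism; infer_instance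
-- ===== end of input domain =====

-- B trades A's fused loop (terminal step folded into every iteration) for a recursive
-- decomposition: hoisted guards for the j = i+1 step, a recursive first-match helper over
-- second[i+2:n], and the terminal step as straight-line fall-through; same O(n).

-- ===== PORT A =====
-- create_array_with_value: append `value` once per element of range(size)
def createArrayWithValue (size : Int) (value : Bool) : List Bool :=
  (PySem.List.pyRange 0 size 1).foldl (fun acc _ => acc ++ [value]) []

-- A's for-loop over range(i+1, n_states+1) with its early returns, as structural recursion
def uLoopA (first second : List Bool) (i loop_size : Int) (current_results : List Bool)
    (n : Int) : List Int → List Bool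
  | [] => []   -- Python falls off the loop and returns None (excluded by Pre_)
  | j :: rest =>
    if j = n then
      let actual_j := n - loop_size
      if (current_results.length : Int) ≤ actual_j then createArrayWithValue (n - i) false
      else if PySem.List.pyGetD current_results actual_j false = true then
        createArrayWithValue (j - i) true
      else createArrayWithValue (j - i) false
    else
      if PySem.List.pyGetD second j false = true then createArrayWithValue (j - i + 1) true
      else if PySem.List.pyGetD first i false = false then createArrayWithValue (j - i + 1) false
      else uLoopA first second i loop_size current_results n rest

def U_operator_non_determinism (first : List Bool) (second : List Bool) (i : Int) (loop_size : Int) (current_results : List Bool) : List Bool :=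
  let n : Int := first.length
  uLoopA first second i loop_size current_results n (PySem.List.pyRange (i + 1) (n + 1) 1)

-- ===== PORT B =====
-- _first_true: recursive first-match over second[j:n]
def uFirstTrue (second : List Bool) (j n : Int) : Option Int :=
  if j ≥ n then none
  else if PySem.List.pyGetD second j false = true then some j
  else uFirstTrue second (j + 1) n
termination_by (n - j).toNat
decreasing_by omega

-- B's fall-through terminal step
def uTerminalB (i loop_size : Int) (current_results : List Bool) (n : Int) : List Bool :=
  -- actual_j = n - loop_size
  if (current_results.length : Int) ≤ n - loop_size then List.replicate (n - i).toNat false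
  else List.replicate (n - i).toNat (PySem.List.pyGetD current_results (n - loop_size) false)

def U_operator_non_determinism_alt (first : List Bool) (second : List Bool) (i : Int) (loop_size : Int) (current_results : List Bool) : List Bool :=
  let n : Int := first.length
  if i ≥ n then []   -- Python B returns None here (excluded by Pre_)
  else if i + 1 < n ∧ PySem.List.pyGetD second (i + 1) false = true then [true, true]
  else if i + 1 < n ∧ PySem.List.pyGetD first i false = false then [false, false]
  else
    match uFirstTrue second (i + 2) n with
    | some k => List.replicate (k - i + 1).toNat true
    | none => uTerminalB i loop_size current_results n

-- ===== PRECONDITION & SPEC =====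
-- Pre_ excludes ONLY inputs on which Python A raises IndexError or returns None instead of a list:
-- i >= len(first) (A falls off the loop, returning None); a second-read the scan actually reaches
-- (all earlier reads False) falling outside range(-len(second), len(second)); a first[i] read that
-- is actually reached with i < -len(first); and, only when the terminal step is actually reached,
-- n - loop_size < -len(current_results). B raises exactly where A raises, so no returning list
-- input is excluded beyond these.
def Pre_U_operator_non_determinism (first : List Bool) (second : List Bool) (i : Int) (loop_size : Int) (current_results : List Bool) : Prop :=
  i < (first.length : Int) ∧
  (i + 1 < (first.length : Int) →
    (-(second.length : Int) ≤ i + 1 ∧ i + 1 < (second.length : Int)) ∧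
    (PySem.List.pyGetD second (i + 1) false = false → -(first.length : Int) ≤ i)) ∧
  (i + 1 < (first.length : Int) → PySem.List.pyGetD second (i + 1) false = false →
    PySem.List.pyGetD first i false = true →
    ∀ j ∈ PySem.List.pyRange (i + 2) (first.length : Int) 1,
      (∀ j' ∈ PySem.List.pyRange (i + 2) j 1, PySem.List.pyGetD second j' false = false) →
      -(second.length : Int) ≤ j ∧ j < (second.length : Int)) ∧
  ((i + 1 = (first.length : Int) ∨
      (PySem.List.pyGetD first i false = true ∧
        ∀ j ∈ PySem.List.pyRange (i + 1) (first.length : Int) 1,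
          PySem.List.pyGetD second j false = false)) →
    -(current_results.length : Int) ≤ (first.length : Int) - loop_size)
instance (first : List Bool) (second : List Bool) (i : Int) (loop_size : Int) (current_results : List Bool) : Decidable (Pre_U_operator_non_determinism first second i loop_size current_results) := by unfold Pre_U_operator_non_determinism; infer_instance

def pvWitness_U_operator_non_determinism : List Bool × List Bool × Int × Int × List Bool :=
  ([true, true, false], [false, false, true], 0, 1, [true, false])

def Spec_U_operator_non_determinism (first : List Bool) (second : List Bool) (i : Int) (loop_size : Int) (current_results : List Bool) (out : List Bool) : Prop := out = U_operator_non_determinism_alt first second i loop_size current_results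
instance (first : List Bool) (second : List Bool) (i : Int) (loop_size : Int) (current_results : List Bool) (out : List Bool) : Decidable (Spec_U_operator_non_determinism first second i loop_size current_results out) := by unfold Spec_U_operator_non_determinism; infer_instance

-- ===== CLAIM =====
def Claim_equal_U_operator_non_determinism : Prop := ∀ (first : List Bool) (second : List Bool) (i : Int) (loop_size : Int) (current_results : List Bool), Dom_U_operator_non_determinism first second i loop_size current_results → Pre_U_operator_non_determinism first second i loop_size current_results → Spec_U_operator_non_determinism first second i loop_size current_results (U_operator_non_determinism first second i loop_size current_results)

-- ===== LEMMAS AND PROOFS =====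

lemma foldl_append_const {α : Type} (v : Bool) :
    ∀ (l : List α) (acc : List Bool),
      l.foldl (fun acc _ => acc ++ [v]) acc = acc ++ List.replicate l.length v := by
  intro l
  induction l with
  | nil => simp
  | cons x xs ih =>
    intro acc
    simp [List.foldl_cons, ih, List.replicate_succ]

lemma createArray_eq_replicate (size : Int) (v : Bool) :
    createArrayWithValue size v = List.replicate size.toNat v := by
  unfold createArrayWithValue
  rw [foldl_append_const, PySem.List.length_pyRange_one]
  simp

-- A's terminal branch (the j = n iteration) is B's fall-through terminal step
lemma terminalA_eq (i loop_size : Int) (cr : List Bool) (n : Int) :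
    (if (cr.length : Int) ≤ n - loop_size then createArrayWithValue (n - i) false
     else if PySem.List.pyGetD cr (n - loop_size) false = true then
       createArrayWithValue (n - i) true
     else createArrayWithValue (n - i) false) = uTerminalB i loop_size cr n := by
  rw [createArray_eq_replicate, createArray_eq_replicate]
  unfold uTerminalB
  split_ifs with h1 h2
  · rfl
  · rw [h2]
  · have hf : PySem.List.pyGetD cr (n - loop_size) false = false := by
      revert h2; cases PySem.List.pyGetD cr (n - loop_size) false <;> simp
    rw [hf]

-- A's loop with first[i] true = B's recursive first-match, generalized to a start j
lemma loopA_scan (first second : List Bool) (i loop_size : Int) (cr : List Bool) (n : Int)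
    (hfi : PySem.List.pyGetD first i false = true) :
    ∀ (m : Nat) (j : Int), j = n - m →
      uLoopA first second i loop_size cr n (PySem.List.pyRange j (n + 1) 1) =
        (match uFirstTrue second j n with
          | some k => List.replicate (k - i + 1).toNat true
          | none => uTerminalB i loop_size cr n) := by
  intro m
  induction m with
  | zero =>
    intro j hj
    subst hj
    simp only [Nat.cast_zero, sub_zero]
    rw [PySem.List.pyRange_one_cons (by omega : n < n + 1),
        PySem.List.pyRange_one_eq_nil (le_refl (n + 1))]
    simp only [uLoopA]
    rw [if_pos trivial, terminalA_eq]
    unfold uFirstTrue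
    rw [if_pos (le_refl n)]
  | succ m ih =>
    intro j hj
    have hjn : j < n := by omega
    rw [PySem.List.pyRange_one_cons (by omega : j < n + 1)]
    simp only [uLoopA, if_neg (by omega : ¬ j = n), hfi]
    unfold uFirstTrue
    rw [if_neg (by omega : ¬ j ≥ n)]
    by_cases hs : PySem.List.pyGetD second j false = true
    · rw [if_pos hs, if_pos hs, createArray_eq_replicate]
    · rw [if_neg hs, if_neg (by simp), if_neg hs]
      exact ih (j + 1) (by omega)

-- ===== VERDICT =====
theorem U_operator_non_determinism_spec : Claim_equal_U_operator_non_determinism := by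
  intro first second i loop_size cr _hdom _hpre
  unfold Spec_U_operator_non_determinism U_operator_non_determinism U_operator_non_determinism_alt
  dsimp only
  by_cases hge : i ≥ (first.length : Int)
  · rw [if_pos hge, PySem.List.pyRange_one_eq_nil (by omega)]
    rfl
  rw [if_neg hge]
  by_cases hin : i + 1 = (first.length : Int)
  · -- terminal case: A's range is the singleton [n]; B skips both guards and finds no True
    rw [show PySem.List.pyRange (i + 1) ((first.length : Int) + 1) 1 = [(first.length : Int)] from by
          rw [hin]; exact PySem.List.pyRange_one_singleton _]
    simp only [uLoopA]
    rw [if_pos trivial, terminalA_eq,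
        if_neg (by omega : ¬ (i + 1 < (first.length : Int) ∧ PySem.List.pyGetD second (i + 1) false = true)),
        if_neg (by omega : ¬ (i + 1 < (first.length : Int) ∧ PySem.List.pyGetD first i false = false))]
    unfold uFirstTrue
    rw [if_pos (by omega : i + 2 ≥ (first.length : Int))]
  · have hlt : i + 1 < (first.length : Int) := by omega
    rw [PySem.List.pyRange_one_cons (by omega : i + 1 < (first.length : Int) + 1)]
    simp only [uLoopA, if_neg hin]
    by_cases hs : PySem.List.pyGetD second (i + 1) false = true
    · rw [if_pos hs, if_pos ⟨hlt, hs⟩, createArray_eq_replicate,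
          show i + 1 - i + 1 = (2 : Int) from by ring]
      rfl
    · rw [if_neg hs, if_neg (show ¬ (i + 1 < (first.length : Int) ∧ PySem.List.pyGetD second (i + 1) false = true) from fun h => hs h.2)]
      by_cases hfi : PySem.List.pyGetD first i false = false
      · rw [if_pos hfi, if_pos ⟨hlt, hfi⟩, createArray_eq_replicate,
            show i + 1 - i + 1 = (2 : Int) from by ring]
        rfl
      · have hfi' : PySem.List.pyGetD first i false = true := by
          revert hfi; cases PySem.List.pyGetD first i false <;> simp
        rw [if_neg hfi, if_neg (show ¬ (i + 1 < (first.length : Int) ∧ PySem.List.pyGetD first i false = false) from fun h => hfi h.2)]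
        rw [show i + 1 + 1 = i + 2 from by ring]
        exact loopA_scan first second i loop_size cr (first.length : Int) hfi'
          ((first.length : Int) - (i + 2)).toNat (i + 2) (by omega)
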